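-- pv_equiv track=rewrite | github.com/jocerfranquiz/snippet.jocer.codes | snippet002.py | f
-- ===== SOURCE A (Python) =====
-- def f(s):
--
--     return [
--         f'has alphanumeric? {any([c.isalnum() for c in s])}',
--         f'has alphabetical? {any([c.isalpha() for c in s])}',
--         f'has digits? {any([c.isdigit() for c in s])}',
--         f'has lowercase? {any([c.islower() for c in s])}',
--         f'has uppercase? {any([c.isupper() for c in s])}',
--     ]
-- ===== SOURCE B (Python) =====
-- def f(s):
--     alnum = alpha = digit = lower = upper = False
--     for c in s:
--         if c.isalnum():
--             alnum = True
--         if c.isalpha():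
--             alpha = True
--         if c.isdigit():
--             digit = True
--         if c.islower():
--             lower = True
--         if c.isupper():
--             upper = True
--         if alnum and alpha and digit and lower and upper:
--             break
--     return [
--         f'has alphanumeric? {alnum}',
--         f'has alphabetical? {alpha}',
--         f'has digits? {digit}',
--         f'has lowercase? {lower}',
--         f'has uppercase? {upper}',
--     ]
-- ===== Notes on version B (the rewrite author's own statement) =====
-- stated objective: simpler
-- what changed: Replaces five separate any()-comprehension scans (each building a temporary list) with one pass over s maintaining five boolean flags, breaking early once all five are set.
import Mathlib
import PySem

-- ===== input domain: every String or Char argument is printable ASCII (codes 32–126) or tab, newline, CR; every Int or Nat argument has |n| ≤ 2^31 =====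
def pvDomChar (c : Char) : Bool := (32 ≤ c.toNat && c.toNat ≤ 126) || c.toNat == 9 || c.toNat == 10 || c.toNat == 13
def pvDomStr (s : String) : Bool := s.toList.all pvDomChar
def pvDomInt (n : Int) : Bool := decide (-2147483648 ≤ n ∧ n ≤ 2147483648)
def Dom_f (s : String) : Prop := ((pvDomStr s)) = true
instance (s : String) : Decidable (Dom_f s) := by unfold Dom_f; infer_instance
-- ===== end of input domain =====

-- B replaces A's five separate any()-comprehension scans by one pass that accumulates five
-- boolean flags with an early break; same five messages in the same order (objective: simpler).

-- f-string interpolation of a Python bool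
def pyBoolStr (b : Bool) : String := if b then "True" else "False"

-- ===== PORT A =====
def f (s : String) : List String :=
  [ "has alphanumeric? " ++ pyBoolStr ((s.toList.map (fun c => PySem.Chars.isalnum c)).any (fun b => b)),
    "has alphabetical? " ++ pyBoolStr ((s.toList.map (fun c => PySem.Chars.isalpha c)).any (fun b => b)),
    "has digits? " ++ pyBoolStr ((s.toList.map (fun c => PySem.Chars.isdigit c)).any (fun b => b)),
    "has lowercase? " ++ pyBoolStr ((s.toList.map (fun c => PySem.Chars.islower c)).any (fun b => b)),
    "has uppercase? " ++ pyBoolStr ((s.toList.map (fun c => PySem.Chars.isupper c)).any (fun b => b)) ]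

-- ===== PORT B =====
-- the single pass of Source B: five flags, updated per character, early break once all are set
def fAltLoop : List Char → Bool → Bool → Bool → Bool → Bool → Bool × Bool × Bool × Bool × Bool
  | [], alnum, alpha, digit, lower, upper => (alnum, alpha, digit, lower, upper)
  | c :: rest, alnum, alpha, digit, lower, upper =>
    let alnum := if PySem.Chars.isalnum c then true else alnum
    let alpha := if PySem.Chars.isalpha c then true else alpha
    let digit := if PySem.Chars.isdigit c then true else digit
    let lower := if PySem.Chars.islower c then true else lower
    let upper := if PySem.Chars.isupper c then true else upper
    if alnum && alpha && digit && lower && upper then (alnum, alpha, digit, lower, upper)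
    else fAltLoop rest alnum alpha digit lower upper

def f_alt (s : String) : List String :=
  let r := fAltLoop s.toList false false false false false
  [ "has alphanumeric? " ++ pyBoolStr r.1,
    "has alphabetical? " ++ pyBoolStr r.2.1,
    "has digits? " ++ pyBoolStr r.2.2.1,
    "has lowercase? " ++ pyBoolStr r.2.2.2.1,
    "has uppercase? " ++ pyBoolStr r.2.2.2.2 ]

-- ===== PRECONDITION & SPEC =====
def Spec_f (s : String) (out : List String) : Prop := out = f_alt s
instance (s : String) (out : List String) : Decidable (Spec_f s out) := by unfold Spec_f; infer_instance

-- ===== CLAIM (what is proved, stated in full; the proofs are below) =====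
def Claim_equal_f : Prop := ∀ (s : String), Dom_f s → Spec_f s (f s)

-- ===== LEMMAS AND PROOFS =====
theorem fAltLoop_eq (cs : List Char) (a b c d e : Bool) :
    fAltLoop cs a b c d e =
      (a || cs.any PySem.Chars.isalnum, b || cs.any PySem.Chars.isalpha,
       c || cs.any PySem.Chars.isdigit, d || cs.any PySem.Chars.islower,
       e || cs.any PySem.Chars.isupper) := by
  induction cs generalizing a b c d e with
  | nil => simp [fAltLoop]
  | cons ch rest ih =>
    simp only [fAltLoop, List.any_cons]
    cases h1 : PySem.Chars.isalnum ch <;> cases h2 : PySem.Chars.isalpha ch <;>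
      cases h3 : PySem.Chars.isdigit ch <;> cases h4 : PySem.Chars.islower ch <;>
      cases h5 : PySem.Chars.isupper ch <;>
      simp only [if_true, Bool.false_or, Bool.true_or, ih] <;>
      split_ifs <;> simp_all

-- ===== VERDICT (by name: the statement is the Claim_ definition above) =====
theorem f_spec : Claim_equal_f := by
  intro s _
  unfold Spec_f f f_alt
  simp [fAltLoop_eq, List.any_map, Function.comp_def]
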